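-- pv_equiv track=rewrite | github.com/AnuragIndora/AgenticRAG-Application | agents_pipeline.py | looks_like_sql_query
-- ===== SOURCE A (Python) =====
-- def looks_like_sql_query(query: str, tables: list, columns: list) -> bool:
--     """
--     Score-based heuristic SQL detection to reduce false positives.
--     """
--     q = query.lower()
--     score = 0
--
--     sql_keywords = [
--         "select", "from", "where",
--         "group by", "order by",
--         "join", "having"
--     ]
--
--     # Strong keyword match
--     if any(keyword in q for keyword in sql_keywords):
--         score += 3
--
--     # Table name match
--     if any(table.lower() in q for table in tables):
--         score += 2
--
--     # Column name match
--     if any(col.lower() in q for col in columns):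
--         score += 1
--
--     # Strong structural signal
--     if "select" in q and "from" in q:
--         score += 5
--
--     return score >= 3
-- ===== SOURCE B (Python) =====
-- def looks_like_sql_query(query: str, tables: list, columns: list) -> bool:
--     # Early-return scan: a keyword alone suffices; otherwise a table match
--     # counts only together with a column match. No score accumulator.
--     q = query.lower()
--     for kw in ("select", "from", "where", "group by", "order by", "join", "having"):
--         if kw in q:
--             return True
--     for table in tables:
--         if table.lower() in q:
--             for col in columns:
--                 if col.lower() in q:
--                     return True
--             return False
--     return False
-- ===== Notes on version B (the rewrite author's own statement) =====
-- stated objective: simpler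
-- what changed: Replaces the integer score accumulator and >=3 threshold with early-return scans: any keyword returns True immediately, otherwise a table match is followed only by a column scan; no score is ever computed.
import Mathlib
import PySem

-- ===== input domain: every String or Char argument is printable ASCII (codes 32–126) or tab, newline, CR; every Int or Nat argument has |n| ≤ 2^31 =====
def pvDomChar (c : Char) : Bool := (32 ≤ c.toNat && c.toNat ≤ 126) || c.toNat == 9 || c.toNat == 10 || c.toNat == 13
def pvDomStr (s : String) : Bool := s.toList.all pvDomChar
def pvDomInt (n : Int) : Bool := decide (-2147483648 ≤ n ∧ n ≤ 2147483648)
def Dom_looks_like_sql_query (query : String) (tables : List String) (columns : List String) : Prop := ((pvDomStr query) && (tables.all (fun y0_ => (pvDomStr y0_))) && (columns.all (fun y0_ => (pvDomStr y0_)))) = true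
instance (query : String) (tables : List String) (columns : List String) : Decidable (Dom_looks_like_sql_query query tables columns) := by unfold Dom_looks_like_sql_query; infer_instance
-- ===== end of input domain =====

-- B replaces A's integer score accumulator and threshold with early-return recursive scans (simpler).

-- ===== PORT A =====
def looks_like_sql_query (query : String) (tables : List String) (columns : List String) : Bool :=
  let q := PySem.Str.lower query
  let score : Int := 0
  let sql_keywords : List String := ["select", "from", "where", "group by", "order by", "join", "having"]
  let score := if sql_keywords.any (fun keyword => PySem.Str.isIn keyword q) then score + 3 else score
  let score := if tables.any (fun table => PySem.Str.isIn (PySem.Str.lower table) q) then score + 2 else score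
  let score := if columns.any (fun col => PySem.Str.isIn (PySem.Str.lower col) q) then score + 1 else score
  let score := if PySem.Str.isIn "select" q && PySem.Str.isIn "from" q then score + 5 else score
  decide (score ≥ 3)

-- ===== PORT B =====
-- first loop of Source B: scan the keyword tuple, return True on the first hit
def pvScanKeywords (kws : List String) (q : String) : Bool :=
  match kws with
  | [] => false
  | kw :: rest => if PySem.Str.isIn kw q then true else pvScanKeywords rest q

-- inner loop of Source B: scan columns, return True on the first hit
def pvScanColumns (cols : List String) (q : String) : Bool :=
  match cols with
  | [] => false
  | col :: rest => if PySem.Str.isIn (PySem.Str.lower col) q then true else pvScanColumns rest q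

-- second loop of Source B: on the first table hit, the answer is the column scan
def pvScanTables (ts : List String) (cols : List String) (q : String) : Bool :=
  match ts with
  | [] => false
  | t :: rest =>
      if PySem.Str.isIn (PySem.Str.lower t) q then pvScanColumns cols q
      else pvScanTables rest cols q

def looks_like_sql_query_alt (query : String) (tables : List String) (columns : List String) : Bool :=
  let q := PySem.Str.lower query
  if pvScanKeywords ["select", "from", "where", "group by", "order by", "join", "having"] q then true
  else pvScanTables tables columns q

-- ===== PRECONDITION & SPEC =====
def Spec_looks_like_sql_query (query : String) (tables : List String) (columns : List String) (out : Bool) : Prop := out = looks_like_sql_query_alt query tables columns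
instance (query : String) (tables : List String) (columns : List String) (out : Bool) : Decidable (Spec_looks_like_sql_query query tables columns out) := by unfold Spec_looks_like_sql_query; infer_instance

-- ===== CLAIM =====
def Claim_equal_looks_like_sql_query : Prop := ∀ (query : String) (tables : List String) (columns : List String), Dom_looks_like_sql_query query tables columns → Spec_looks_like_sql_query query tables columns (looks_like_sql_query query tables columns)

-- ===== LEMMAS AND PROOFS =====
theorem pvScanKeywords_eq_any (kws : List String) (q : String) :
    pvScanKeywords kws q = kws.any (fun kw => PySem.Str.isIn kw q) := by
  induction kws with
  | nil => rfl
  | cons kw rest ih =>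
      cases h : PySem.Str.isIn kw q <;>
        simp only [pvScanKeywords, List.any_cons, h, Bool.false_eq_true, if_true, if_false, ih,
          Bool.false_or, Bool.true_or]

theorem pvScanColumns_eq_any (cols : List String) (q : String) :
    pvScanColumns cols q = cols.any (fun col => PySem.Str.isIn (PySem.Str.lower col) q) := by
  induction cols with
  | nil => rfl
  | cons col rest ih =>
      cases h : PySem.Str.isIn (PySem.Str.lower col) q <;>
        simp only [pvScanColumns, List.any_cons, h, Bool.false_eq_true, if_true, if_false, ih,
          Bool.false_or, Bool.true_or]

theorem pvScanTables_eq (ts cols : List String) (q : String) :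
    pvScanTables ts cols q =
      (ts.any (fun t => PySem.Str.isIn (PySem.Str.lower t) q)
        && cols.any (fun col => PySem.Str.isIn (PySem.Str.lower col) q)) := by
  induction ts with
  | nil => rfl
  | cons t rest ih =>
      cases h : PySem.Str.isIn (PySem.Str.lower t) q <;>
        simp only [pvScanTables, List.any_cons, h, Bool.false_eq_true, if_true, if_false, ih,
          pvScanColumns_eq_any, Bool.false_or, Bool.true_or, Bool.true_and]

-- ===== VERDICT =====
theorem looks_like_sql_query_spec : Claim_equal_looks_like_sql_query := by
  intro query tables columns _
  unfold Spec_looks_like_sql_query looks_like_sql_query looks_like_sql_query_alt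
  simp only [pvScanKeywords_eq_any, pvScanTables_eq]
  split_ifs <;> simp_all
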